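-- pv_equiv track=rewrite | github.com/tandra-rahul/rahul-epi | epi_judge_python/number_of_traversals_staircase.py | number_of_ways_to_top
-- ===== SOURCE A (Python) =====
-- def number_of_ways_to_top(top: int, maximum_step: int) -> int:
--     # TODO - you fill in here.
--     # TODO - you fill in here.
--     d = {}
--
--     def num_ways_helper(top):
--
--         if top == 0:
--             return 1
--
--         count = 0
--         for i in reversed(range(1, maximum_step+1)):
--             new = top - i
--             if new >= 0:
--                 if new not in d:
--                     d[new] = num_ways_helper(new)
--
--                 count += d[new]
--
--         return count
--
--     return num_ways_helper(top)
-- ===== SOURCE B (Python) =====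
-- def number_of_ways_to_top(top: int, maximum_step: int) -> int:
--     # Bottom-up DP with a sliding-window sum of the last maximum_step
--     # table entries: O(top) additions instead of O(top*maximum_step).
--     if top < 0 or (top > 0 and maximum_step <= 0):
--         return 0
--     if top == 0:
--         return 1
--     ways = [1]
--     window = 1  # sum of the last min(maximum_step, len(ways)) entries
--     for n in range(1, top + 1):
--         cur = window
--         ways.append(cur)
--         window += cur
--         if n >= maximum_step:
--             window -= ways[n - maximum_step]
--     return ways[top]
-- ===== Notes on version B (the rewrite author's own statement) =====
-- stated objective: faster
-- what changed: Top-down memoized recursion that scans all maximum_step predecessors per value is replaced by a bottom-up table with a sliding-window sum of the last maximum_step entries, O(1) additions per entry; Pre_ excludes inputs with 0 < 900*maximum_step <= top, where A's recursion depth (about top/maximum_step) reaches Python's recursion limit and A raises RecursionError -- the bound is conservative, so a few near-limit inputs on which A still returns are excluded too.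
-- outside the precondition, e.g. on number_of_ways_to_top(930, 1): A returns 1, B returns 1
import Mathlib
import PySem

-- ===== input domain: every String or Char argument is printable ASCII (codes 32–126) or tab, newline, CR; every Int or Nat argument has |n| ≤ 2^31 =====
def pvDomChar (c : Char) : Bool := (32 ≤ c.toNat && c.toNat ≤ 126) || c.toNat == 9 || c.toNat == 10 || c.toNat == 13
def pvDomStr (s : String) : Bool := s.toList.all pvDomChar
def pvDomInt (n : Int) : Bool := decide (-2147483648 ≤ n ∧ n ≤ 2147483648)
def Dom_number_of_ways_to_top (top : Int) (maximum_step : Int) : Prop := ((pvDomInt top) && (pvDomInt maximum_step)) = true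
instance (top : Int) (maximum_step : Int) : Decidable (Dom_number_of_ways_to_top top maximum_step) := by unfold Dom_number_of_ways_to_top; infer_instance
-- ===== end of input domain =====

-- B replaces A's top-down memoized recursion (which scans all maximum_step predecessors
-- per value) by a bottom-up table with a sliding-window sum: O(top) vs O(top*maximum_step).


-- ===== PORT A =====
-- num_ways_helper, with the shared memo dict threaded through and a fuel argument that
-- only makes the recursion structural: helper t only recurses on 0 ≤ new < t, so the
-- wrapper's fuel (top.toNat + 1) is never exhausted (the fuel-0 branch is unreachable).
def pvHelperA (maximum_step : Int) : Nat → Int → PySem.Dict Int Int → PySem.Dict Int Int × Int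
  | 0, _, d => (d, 0)
  | fuel+1, top, d =>
    if top = 0 then (d, 1)
    else
      -- for i in reversed(range(1, maximum_step+1)): state = (d, count)
      ((PySem.List.pyRange 1 (maximum_step+1) 1).reverse).foldl
        (fun (st : PySem.Dict Int Int × Int) i =>
          let new := top - i
          if 0 ≤ new then
            let d' := if (st.1.get? new).isSome then st.1
                      else
                        let r := pvHelperA maximum_step fuel new st.1
                        r.1.insert new r.2
            -- count += d[new]: the key is present here, so getD is exact (no KeyError)
            (d', st.2 + d'.getD new 0)
          else st)
        (d, 0)

def number_of_ways_to_top (top : Int) (maximum_step : Int) : Int :=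
  (pvHelperA maximum_step (top.toNat + 1) top PySem.Dict.empty).2

-- ===== PORT B =====
def number_of_ways_to_top_alt (top : Int) (maximum_step : Int) : Int :=
  if top < 0 ∨ (top > 0 ∧ maximum_step ≤ 0) then 0
  else if top = 0 then 1
  else
    let st := (PySem.List.pyRange 1 (top+1) 1).foldl
      (fun (st : List Int × Int) n =>
        let cur := st.2
        let ways := st.1 ++ [cur]
        let window := st.2 + cur
        -- ways[n - maximum_step]: 0 ≤ n - maximum_step < len(ways) here, so pyGetD is exact
        let window := if n ≥ maximum_step then window - PySem.List.pyGetD ways (n - maximum_step) 0 else window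
        (ways, window))
      ([1], 1)
    -- ways[top]: 0 ≤ top < len(ways) here, so pyGetD is exact
    PySem.List.pyGetD st.1 top 0

-- ===== PRECONDITION & SPEC =====
-- Pre_ excludes inputs with 0 < 900*maximum_step ≤ top, where A's recursion depth
-- (about top/maximum_step) reaches Python's recursion limit and A raises
-- RecursionError; the bound is conservative, so a few near-limit inputs on which A
-- still returns (e.g. (930, 1)) are excluded too.
def Pre_number_of_ways_to_top (top : Int) (maximum_step : Int) : Prop :=
  top ≤ 0 ∨ maximum_step ≤ 0 ∨ top < 900 * maximum_step
instance (top : Int) (maximum_step : Int) : Decidable (Pre_number_of_ways_to_top top maximum_step) := by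
  unfold Pre_number_of_ways_to_top; infer_instance

def pvWitness_number_of_ways_to_top : Int × Int := (4, 2)

def Spec_number_of_ways_to_top (top : Int) (maximum_step : Int) (out : Int) : Prop := out = number_of_ways_to_top_alt top maximum_step
instance (top : Int) (maximum_step : Int) (out : Int) : Decidable (Spec_number_of_ways_to_top top maximum_step out) := by unfold Spec_number_of_ways_to_top; infer_instance

-- ===== CLAIM (what is proved, stated in full; the proofs are below) =====
def Claim_equal_number_of_ways_to_top : Prop := ∀ (top : Int) (maximum_step : Int), Dom_number_of_ways_to_top top maximum_step → Pre_number_of_ways_to_top top maximum_step → Spec_number_of_ways_to_top top maximum_step (number_of_ways_to_top top maximum_step)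

-- ===== LEMMAS AND PROOFS =====

-- The mathematical staircase table: pvTab mn n = [W 0, …, W n] where W 0 = 1 and
-- W (n+1) = sum of the last min(mn, n+1) previous entries.
def pvTab (mn : Nat) : Nat → List Int
  | 0 => [1]
  | n+1 => pvTab mn n ++ [((pvTab mn n).drop (n+1 - mn)).sum]

def pvW (mn : Nat) (n : Nat) : Int := ((pvTab mn n).getLast?).getD 0

theorem pvTab_length (mn n : Nat) : (pvTab mn n).length = n + 1 := by
  induction n with
  | zero => rfl
  | succ n ih => simp [pvTab, ih]

theorem pvW_zero (mn : Nat) : pvW mn 0 = 1 := rfl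

theorem pvW_succ (mn n : Nat) :
    pvW mn (n+1) = ((pvTab mn n).drop (n+1 - mn)).sum := by
  simp [pvW, pvTab]

theorem pvTab_eq_map (mn n : Nat) :
    pvTab mn n = (List.range (n+1)).map (pvW mn) := by
  induction n with
  | zero => rfl
  | succ n ih =>
    rw [show n + 1 + 1 = (n+1) + 1 from rfl, List.range_succ, List.map_append]
    show pvTab mn n ++ _ = _
    rw [ih]
    simp [← pvW_succ, ← ih]

theorem pvW_one (mn : Nat) (h : 1 ≤ mn) : pvW mn 1 = 1 := by
  rw [pvW_succ]
  have : 1 - mn = 0 := by omega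
  simp [this, pvTab]

-- memo-dict invariant: every stored value is correct
def pvInv (mn : Nat) (d : PySem.Dict Int Int) : Prop :=
  ∀ k v, d.get? k = some v → 0 ≤ k ∧ v = pvW mn k.toNat

theorem pvInv_empty (mn : Nat) : pvInv mn PySem.Dict.empty := by
  intro k v h
  simp [PySem.Dict.get?_empty] at h

theorem pvInv_insert (mn : Nat) (d : PySem.Dict Int Int) (k : Int) (hk : 0 ≤ k)
    (h : pvInv mn d) : pvInv mn (d.insert k (pvW mn k.toNat)) := by
  intro k' v hv
  rw [PySem.Dict.get?_insert] at hv
  by_cases hkk : k' = k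
  · subst hkk
    simp at hv
    exact ⟨hk, hv.symm⟩
  · simp [hkk] at hv
    exact h k' v hv

-- The sum A's loop accumulates equals pvW at top (both are the sum of the
-- last min(mn, tn) table entries).
-- summing the suffix of an index range
theorem pvSumSuffix (f : Nat → Int) (a b : Nat) :
    ((((List.range (a + b)).drop a)).map f).sum
    = ((List.range b).map (fun j => f (a + j))).sum := by
  rw [List.range_add, List.drop_left' (by simp), List.map_map]
  rfl

-- a sum over an index range whose first a terms vanish
theorem pvSumSkip (g : Nat → Int) (a b : Nat) (h0 : ∀ k < a, g k = 0) :
    ((List.range (a + b)).map g).sum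
    = ((List.range b).map (fun j => g (a + j))).sum := by
  rw [List.range_add, List.map_append, List.sum_append, List.map_map]
  have h1 : ((List.range a).map g).sum = 0 := by
    apply List.sum_eq_zero
    intro x hx
    simp only [List.mem_map, List.mem_range] at hx
    obtain ⟨k, hk, rfl⟩ := hx
    exact h0 k hk
  rw [h1, zero_add]
  rfl

-- The sum A's loop accumulates equals pvW at top (both are the sum of the
-- last min(mn, tn) table entries).
theorem pvSumA (m t : Int) (ht : 1 ≤ t) :
    ((List.range m.toNat).map
        (fun (k : Nat) => if 0 ≤ t - (m - (k : Int)) then pvW m.toNat (t - (m - (k : Int))).toNat else 0)).sum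
    = pvW m.toNat t.toNat := by
  obtain ⟨n, hn⟩ : ∃ n, t.toNat = n + 1 := ⟨t.toNat - 1, by omega⟩
  by_cases hm : 0 ≤ m
  · have hR : pvW m.toNat t.toNat
        = ((List.range (min m.toNat t.toNat)).map
            (fun j => pvW m.toNat (t.toNat - m.toNat + j))).sum := by
      conv_lhs => rw [hn]
      rw [pvW_succ, pvTab_eq_map, ← List.map_drop]
      rw [show List.range (n+1) = List.range ((t.toNat - m.toNat) + min m.toNat t.toNat) from by
        congr 1; omega]
      rw [show n + 1 - m.toNat = t.toNat - m.toNat from by omega]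
      exact pvSumSuffix (pvW m.toNat) (t.toNat - m.toNat) (min m.toNat t.toNat)
    rw [hR]
    rw [show List.range m.toNat = List.range ((m.toNat - t.toNat) + min m.toNat t.toNat) from by
      congr 1; omega]
    rw [pvSumSkip _ _ _ (by intro k hk; rw [if_neg]; omega)]
    apply congrArg
    apply List.map_congr_left
    intro j hj
    rw [List.mem_range] at hj
    rw [if_pos (by push_cast; omega)]
    congr 1
    omega
  · have h0 : m.toNat = 0 := by omega
    rw [h0, hn, pvW_succ]
    rw [List.drop_eq_nil_of_le (by rw [pvTab_length]; omega)]
    simp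
-- pvW is 0 above 0 when there are no allowed steps
theorem pvW_mn_zero (n : Nat) : pvW 0 (n+1) = 0 := by
  rw [pvW_succ, List.drop_eq_nil_of_le (by rw [pvTab_length]; omega)]
  rfl

-- sliding-window recurrence for pvW
theorem pvW_window (mn c : Nat) (hc : 1 ≤ c) :
    pvW mn (c+1) = pvW mn c + pvW mn c - (if mn ≤ c then pvW mn (c - mn) else 0) := by
  obtain ⟨c', rfl⟩ : ∃ c', c = c' + 1 := ⟨c - 1, by omega⟩
  have htab : pvTab mn (c'+1) = pvTab mn c' ++ [pvW mn (c'+1)] := by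
    rw [pvW_succ]; rfl
  by_cases hle : mn ≤ c' + 1
  · rw [if_pos hle]
    have hidx : c' + 1 - mn < (pvTab mn (c'+1)).length := by rw [pvTab_length]; omega
    have h1 : (List.drop (c'+1-mn) (pvTab mn (c'+1))).sum
        = (pvTab mn (c'+1))[c'+1-mn] + (List.drop (c'+1-mn+1) (pvTab mn (c'+1))).sum := by
      conv_lhs => rw [List.drop_eq_getElem_cons hidx]
      rw [List.sum_cons]
    have h4 : (List.drop (c'+1-mn) (pvTab mn c')).sum = pvW mn (c'+1) := (pvW_succ mn c').symm
    have h2 : (List.drop (c'+1-mn) (pvTab mn (c'+1))).sum = pvW mn (c'+1) + pvW mn (c'+1) := by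
      rw [htab, List.drop_append_of_le_length (by rw [pvTab_length]; omega),
        List.sum_append, h4]
      simp
    have hget : (pvTab mn (c'+1))[c'+1-mn]'hidx = pvW mn (c' + 1 - mn) := by
      simp [pvTab_eq_map]
    have h5 : pvW mn (c'+1+1) = (List.drop (c'+1-mn+1) (pvTab mn (c'+1))).sum := by
      rw [pvW_succ, show c'+1+1-mn = c'+1-mn+1 from by omega]
    rw [h5]
    omega
  · rw [if_neg hle]
    have h5 : pvW mn (c'+1+1) = (pvTab mn (c'+1)).sum := by
      rw [pvW_succ, show c'+1+1-mn = 0 from by omega, List.drop_zero]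
    have h4 : (pvTab mn c').sum = pvW mn (c'+1) := by
      conv_rhs => rw [pvW_succ, show c'+1-mn = 0 from by omega, List.drop_zero]
    rw [h5, htab, List.sum_append, h4]
    simp

-- list-sum over an index range as a Finset sum
theorem pvListFinset (f : Nat → Int) (n : Nat) :
    ((List.range n).map f).sum = ∑ i ∈ Finset.range n, f i := by
  induction n with
  | zero => simp
  | succ n ih =>
    rw [List.range_succ, List.map_append, List.sum_append, Finset.sum_range_succ, ih]
    simp

-- pvSumA with the steps enumerated in ascending order (as A's reversed loop visits them)
theorem pvSumA' (m t : Int) (hm : 1 ≤ m) (ht : 1 ≤ t) :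
    ((List.range m.toNat).map
        (fun (k : Nat) => if 0 ≤ t - (1 + (k:Int)) then pvW m.toNat (t - (1 + (k:Int))).toNat else 0)).sum
    = pvW m.toNat t.toNat := by
  rw [← pvSumA m t ht, pvListFinset, pvListFinset, ← Finset.sum_range_reflect]
  apply Finset.sum_congr rfl
  intro k hk
  rw [Finset.mem_range] at hk
  rw [show (1 + ((m.toNat - 1 - k : Nat) : Int)) = m - (k : Int) from by omega]

theorem pvTab_succ (mn c : Nat) : pvTab mn (c+1) = pvTab mn c ++ [pvW mn (c+1)] := by
  rw [pvW_succ]; rfl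

-- A's helper returns pvW and preserves the memo invariant
theorem pvHelperA_correct (m : Int) :
    ∀ (fuel : Nat) (t : Int) (d : PySem.Dict Int Int), 0 ≤ t → t.toNat < fuel →
      pvInv m.toNat d →
      (pvHelperA m fuel t d).2 = pvW m.toNat t.toNat ∧
      pvInv m.toNat (pvHelperA m fuel t d).1 := by
  intro fuel
  induction fuel with
  | zero => intro t d ht hf hd; omega
  | succ fuel ih =>
    intro t d ht hf hd
    by_cases ht0 : t = 0
    · subst ht0
      simp only [pvHelperA]
      exact ⟨(pvW_zero m.toNat).symm, hd⟩
    · have ht1 : 1 ≤ t := by omega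
      have hrw : pvHelperA m (fuel+1) t d
          = ((PySem.List.pyRange 1 (m+1) 1).reverse).foldl
              (fun (st : PySem.Dict Int Int × Int) i =>
                let new := t - i
                if 0 ≤ new then
                  let d' := if (st.1.get? new).isSome then st.1
                            else
                              let r := pvHelperA m fuel new st.1
                              r.1.insert new r.2
                  (d', st.2 + d'.getD new 0)
                else st)
              (d, 0) := by
        simp only [pvHelperA, if_neg ht0]
      rw [hrw]
      have loop : ∀ (L : List Int), (∀ i ∈ L, 1 ≤ i) →
          ∀ (d0 : PySem.Dict Int Int) (c : Int), pvInv m.toNat d0 →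
          pvInv m.toNat ((L.foldl
              (fun (st : PySem.Dict Int Int × Int) i =>
                let new := t - i
                if 0 ≤ new then
                  let d' := if (st.1.get? new).isSome then st.1
                            else
                              let r := pvHelperA m fuel new st.1
                              r.1.insert new r.2
                  (d', st.2 + d'.getD new 0)
                else st)
              (d0, c)).1) ∧
          (L.foldl
              (fun (st : PySem.Dict Int Int × Int) i =>
                let new := t - i
                if 0 ≤ new then
                  let d' := if (st.1.get? new).isSome then st.1
                            else
                              let r := pvHelperA m fuel new st.1
                              r.1.insert new r.2
                  (d', st.2 + d'.getD new 0)
                else st)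
              (d0, c)).2
            = c + (L.map (fun i => if 0 ≤ t - i then pvW m.toNat (t - i).toNat else 0)).sum := by
        intro L
        induction L with
        | nil => intro _ d0 c hd0; exact ⟨hd0, by simp⟩
        | cons i L ihL =>
          intro hL d0 c hd0
          have hi : 1 ≤ i := hL i (by simp)
          have hL' : ∀ j ∈ L, 1 ≤ j := fun j hj => hL j (by simp [hj])
          rw [List.foldl_cons, List.map_cons, List.sum_cons]
          by_cases hnew : 0 ≤ t - i
          · simp only [if_pos hnew]
            by_cases hmem : (d0.get? (t - i)).isSome
            · obtain ⟨v, hv⟩ := Option.isSome_iff_exists.mp hmem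
              obtain ⟨hk, hveq⟩ := hd0 _ _ hv
              simp only [if_pos hmem]
              have hgetD : d0.getD (t - i) 0 = v := by
                rw [PySem.Dict.getD_eq_get?_getD, hv]
                rfl
              rw [hgetD]
              obtain ⟨hA, hB⟩ := ihL hL' d0 (c + v) hd0
              refine ⟨hA, ?_⟩
              rw [hB, hveq]
              ring
            · simp only [if_neg hmem]
              have hnlt : (t - i).toNat < fuel := by omega
              obtain ⟨hval, hinv⟩ := ih (t - i) d0 hnew hnlt hd0
              have hins : pvInv m.toNat
                  ((pvHelperA m fuel (t - i) d0).1.insert (t - i)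
                    ((pvHelperA m fuel (t - i) d0).2)) := by
                rw [hval]
                exact pvInv_insert _ _ _ hnew hinv
              have hgd : ((pvHelperA m fuel (t - i) d0).1.insert (t - i)
                    ((pvHelperA m fuel (t - i) d0).2)).getD (t - i) 0
                  = pvW m.toNat (t - i).toNat := by
                rw [PySem.Dict.getD_eq_get?_getD, PySem.Dict.get?_insert]
                simp [hval]
              rw [hgd]
              obtain ⟨hA, hB⟩ := ihL hL' _ (c + pvW m.toNat (t - i).toNat) hins
              refine ⟨hA, ?_⟩
              rw [hB]
              ring
          · simp only [if_neg hnew]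
            obtain ⟨hA, hB⟩ := ihL hL' d0 c hd0
            refine ⟨hA, ?_⟩
            rw [hB]
            ring
      have hmem1 : ∀ i ∈ (PySem.List.pyRange 1 (m+1) 1).reverse, 1 ≤ i := by
        intro i hi
        rw [List.mem_reverse, PySem.List.mem_pyRange_one] at hi
        omega
      obtain ⟨hA, hB⟩ := loop _ hmem1 d 0 hd
      refine ⟨?_, hA⟩
      rw [hB, zero_add, List.map_reverse, List.sum_reverse]
      by_cases hm : 1 ≤ m
      · rw [PySem.List.pyRange_one, List.map_map]
        rw [show ((m + 1 - 1 : Int)) = m from by ring]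
        rw [← pvSumA' m t hm ht1]
        rfl
      · rw [PySem.List.pyRange_one_eq_nil (by omega)]
        obtain ⟨n, hn⟩ : ∃ n, t.toNat = n + 1 := ⟨t.toNat - 1, by omega⟩
        rw [show m.toNat = 0 from by omega, hn, pvW_mn_zero]
        simp
-- A returns pvW on nonnegative top
theorem pvA_eval (t m : Int) (ht : 0 ≤ t) :
    number_of_ways_to_top t m = pvW m.toNat t.toNat :=
  (pvHelperA_correct m (t.toNat + 1) t PySem.Dict.empty ht (by omega)
    (pvInv_empty m.toNat)).1

-- A returns 0 on negative top (every step size in the loop is ≥ 1)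
theorem pvA_neg (t m : Int) (ht : t < 0) : number_of_ways_to_top t m = 0 := by
  unfold number_of_ways_to_top
  have hfuel : t.toNat + 1 = 1 := by omega
  rw [hfuel]
  have hrw : pvHelperA m 1 t PySem.Dict.empty
      = ((PySem.List.pyRange 1 (m+1) 1).reverse).foldl
          (fun (st : PySem.Dict Int Int × Int) i =>
            let new := t - i
            if 0 ≤ new then
              let d' := if (st.1.get? new).isSome then st.1
                        else
                          let r := pvHelperA m 0 new st.1
                          r.1.insert new r.2
              (d', st.2 + d'.getD new 0)
            else st)
          (PySem.Dict.empty, 0) := by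
    simp only [pvHelperA, if_neg (by omega : ¬ t = 0)]
  rw [hrw]
  have skip : ∀ (L : List Int), (∀ i ∈ L, 1 ≤ i) →
      ∀ (st : PySem.Dict Int Int × Int),
      L.foldl
          (fun (st : PySem.Dict Int Int × Int) i =>
            let new := t - i
            if 0 ≤ new then
              let d' := if (st.1.get? new).isSome then st.1
                        else
                          let r := pvHelperA m 0 new st.1
                          r.1.insert new r.2
              (d', st.2 + d'.getD new 0)
            else st)
          st = st := by
    intro L
    induction L with
    | nil => intro _ st; rfl
    | cons i L ihL =>
      intro hL st
      have hi : 1 ≤ i := hL i (by simp)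
      rw [List.foldl_cons]
      simp only [if_neg (by omega : ¬ (0:Int) ≤ t - i)]
      exact ihL (fun j hj => hL j (by simp [hj])) st
  rw [skip _ (by
    intro i hi
    rw [List.mem_reverse, PySem.List.mem_pyRange_one] at hi
    omega)]

-- B's loop builds the table and carries pvW of the next index as the window
theorem pvLoopB (m : Int) (hm : 1 ≤ m) :
    ∀ (c : Nat),
      (PySem.List.pyRange 1 ((c : Int) + 1) 1).foldl
        (fun (st : List Int × Int) n =>
          let cur := st.2
          let ways := st.1 ++ [cur]
          let window := st.2 + cur
          let window := if n ≥ m then window - PySem.List.pyGetD ways (n - m) 0 else window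
          (ways, window))
        ([1], 1)
      = (pvTab m.toNat c, pvW m.toNat (c + 1)) := by
  intro c
  induction c with
  | zero =>
    simp only [Nat.cast_zero, zero_add]
    rw [PySem.List.pyRange_one_eq_nil (by omega), List.foldl_nil]
    rw [pvW_one _ (by omega)]
    rfl
  | succ c ihc =>
    have hsplit : PySem.List.pyRange 1 (((c+1 : Nat) : Int) + 1) 1
        = PySem.List.pyRange 1 ((c : Int) + 1) 1 ++ [((c : Int) + 1)] := by
      rw [show (((c+1 : Nat)) : Int) + 1 = ((c : Int) + 1) + 1 from by push_cast; ring]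
      exact PySem.List.pyRange_one_succ_right (by omega)
    rw [hsplit, List.foldl_append, ihc, List.foldl_cons, List.foldl_nil]
    simp only
    have hways : pvTab m.toNat c ++ [pvW m.toNat (c + 1)] = pvTab m.toNat (c + 1) :=
      (pvTab_succ m.toNat c).symm
    rw [hways]
    have hwin : (if ((c : Int) + 1) ≥ m then
          pvW m.toNat (c+1) + pvW m.toNat (c+1)
            - PySem.List.pyGetD (pvTab m.toNat (c+1)) (((c : Int) + 1) - m) 0
        else pvW m.toNat (c+1) + pvW m.toNat (c+1))
        = pvW m.toNat (c + 1 + 1) := by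
      rw [pvW_window m.toNat (c+1) (by omega)]
      by_cases hcm : m ≤ (c : Int) + 1
      · rw [if_pos hcm, if_pos (by omega : m.toNat ≤ c + 1)]
        have hidx : ((c : Int) + 1) - m = (((c + 1 - m.toNat : Nat)) : Int) := by omega
        rw [hidx, PySem.List.pyGetD_natCast]
        rw [List.getD_eq_getElem _ _ (by rw [pvTab_length]; omega)]
        simp [pvTab_eq_map]
      · rw [if_neg hcm, if_neg (by omega : ¬ m.toNat ≤ c + 1)]
        ring
    rw [hwin]

-- B returns pvW on positive top and positive maximum_step
theorem pvB_eval (t m : Int) (ht : 1 ≤ t) (hm : 1 ≤ m) :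
    number_of_ways_to_top_alt t m = pvW m.toNat t.toNat := by
  unfold number_of_ways_to_top_alt
  rw [if_neg (by omega), if_neg (by omega : ¬ t = 0)]
  rw [show (t + 1 : Int) = ((t.toNat : Nat) : Int) + 1 from by omega]
  rw [pvLoopB m hm t.toNat]
  rw [show (t : Int) = ((t.toNat : Nat) : Int) from by omega, PySem.List.pyGetD_natCast]
  rw [List.getD_eq_getElem _ _ (by rw [pvTab_length]; omega)]
  simp [pvTab_eq_map]
  congr 1
  omega

theorem number_of_ways_to_top_spec : Claim_equal_number_of_ways_to_top := by
  unfold Claim_equal_number_of_ways_to_top Spec_number_of_ways_to_top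
  intro t m _ _
  by_cases ht0 : t < 0
  · rw [pvA_neg t m ht0]
    unfold number_of_ways_to_top_alt
    rw [if_pos (Or.inl ht0)]
  · by_cases ht1 : t = 0
    · subst ht1
      simp [number_of_ways_to_top, number_of_ways_to_top_alt, pvHelperA]
    · have ht : 1 ≤ t := by omega
      by_cases hm : 1 ≤ m
      · rw [pvA_eval t m (by omega), pvB_eval t m ht hm]
      · rw [pvA_eval t m (by omega)]
        unfold number_of_ways_to_top_alt
        rw [if_pos (Or.inr ⟨by omega, by omega⟩)]
        obtain ⟨n, hn⟩ : ∃ n, t.toNat = n + 1 := ⟨t.toNat - 1, by omega⟩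
        rw [show m.toNat = 0 from by omega, hn, pvW_mn_zero]
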